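-- pv_equiv track=rewrite | github.com/Yan-Zhelanov/algorithms | sprint_4/1_issues/c_prefix_hashes.py | get_prefixs
-- ===== SOURCE A (Python) =====
-- def get_hash(ground, module, text):
--     if text == '':
--         return 0
--     index = 0
--     result = 0
--     size = len(text) - 1
--     while index < size:
--         result = (((result + ord(text[index])) % module) * ground) % module
--         index += 1
--     return (result + ord(text[index])) % module
--
-- def get_prefixs(ground, module, text, array):
--     hashed_text = [get_hash(ground, module, char) for char in text]
--     result = []
--     for left, right in array:
--         result.append(sum(
--             hashed_char % module
--             for hashed_char in hashed_text[int(left)-1:int(right)]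
--         ) % module)
--     return '\n'.join(str(hashed_text) for hashed_text in result)
-- ===== SOURCE B (Python) =====
-- def get_prefixs(ground, module, text, array):
--     prefix = [0]
--     for char in text:
--         prefix.append(prefix[-1] + ord(char) % module)
--     lines = []
--     for left, right in array:
--         start, stop, _ = slice(int(left) - 1, int(right)).indices(len(text))
--         lines.append(str((prefix[stop] - prefix[start]) % module if start < stop else 0))
--     return '\n'.join(lines)
-- ===== Notes on version B (the rewrite author's own statement) =====
-- stated objective: faster
-- what changed: B precomputes one prefix-sum table of the per-character hashes and answers each (left,right) query in O(1) by a prefix difference over the normalized slice bounds, instead of A's per-query re-summation over the slice; Pre_ excludes module = 0 (with nonempty text or queries), where A raises ZeroDivisionError.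
import Mathlib
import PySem

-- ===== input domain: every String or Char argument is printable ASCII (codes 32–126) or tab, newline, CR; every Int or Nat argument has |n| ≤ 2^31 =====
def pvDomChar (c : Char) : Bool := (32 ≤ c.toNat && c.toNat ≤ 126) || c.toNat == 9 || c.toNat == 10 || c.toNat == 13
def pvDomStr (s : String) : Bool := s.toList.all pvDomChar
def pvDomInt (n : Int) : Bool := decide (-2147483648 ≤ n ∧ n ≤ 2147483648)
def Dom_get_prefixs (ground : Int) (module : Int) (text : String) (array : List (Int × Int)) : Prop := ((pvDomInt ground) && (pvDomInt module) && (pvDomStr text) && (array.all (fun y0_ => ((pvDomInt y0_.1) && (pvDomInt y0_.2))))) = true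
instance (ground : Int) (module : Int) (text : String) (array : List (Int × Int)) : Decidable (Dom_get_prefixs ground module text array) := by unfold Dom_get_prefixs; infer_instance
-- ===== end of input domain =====

-- B builds one prefixs-sum table of the per-character hashes and answers each query in
-- O(1) by a prefixs difference over the slice bounds, instead of A's per-query O(N) re-summation.

-- ===== PORT A =====
-- ord(text[index]) in A; the index is always in range where A evaluates it, so getD 0 is dead
def pvOrdAt (text : String) (index : Int) : Int :=
  ((PySem.Str.pyGet? text index).map (fun c => (c.toNat : Int))).getD 0

def get_hash (ground : Int) (module : Int) (text : String) : Int :=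
  if text = "" then 0
  else
    let size : Int := PySem.Str.len text - 1
    -- while index < size: result = (((result + ord(text[index])) % module) * ground) % module
    let result : Int := (PySem.List.pyRange 0 size 1).foldl
      (fun result index =>
        PySem.Int.mod (PySem.Int.mod (result + pvOrdAt text index) module * ground) module) 0
    PySem.Int.mod (result + pvOrdAt text size) module

def get_prefixs (ground : Int) (module : Int) (text : String) (array : List (Int × Int)) : String :=
  let hashed_text : List Int :=
    text.toList.map (fun char => get_hash ground module (String.ofList [char]))
  let result : List Int := array.foldl
    (fun result lr =>
      result ++ [PySem.Int.mod
        (((PySem.List.slice hashed_text (some (lr.1 - 1)) (some lr.2)).map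
            (fun hashed_char => PySem.Int.mod hashed_char module)).sum) module]) []
  PySem.Str.join "\n" (result.map (fun x => PySem.Int.toStr x))

-- ===== PORT B =====
-- slice(a, b).indices(n) with step 1 is exactly PySem.List.clampIdx on each bound
def get_prefixs_alt (ground : Int) (module : Int) (text : String) (array : List (Int × Int)) : String :=
  let prefixs : List Int := text.toList.foldl
    (fun prefixs char =>
      prefixs ++ [PySem.List.pyGetD prefixs (-1) 0 + PySem.Int.mod (char.toNat : Int) module]) [0]
  let lines : List String := array.foldl
    (fun lines lr =>
      let start := PySem.List.clampIdx text.toList.length (lr.1 - 1)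
      let stop := PySem.List.clampIdx text.toList.length lr.2
      lines ++ [PySem.Int.toStr
        (if start < stop then PySem.Int.mod (prefixs.getD stop 0 - prefixs.getD start 0) module
         else 0)]) []
  PySem.Str.join "\n" lines

-- ===== PRECONDITION & SPEC =====
-- A raises ZeroDivisionError whenever module = 0 and it reaches a '%': i.e. unless text and array are both empty.
def Pre_get_prefixs (ground : Int) (module : Int) (text : String) (array : List (Int × Int)) : Prop :=
  module ≠ 0 ∨ (text = "" ∧ array = [])
instance (ground : Int) (module : Int) (text : String) (array : List (Int × Int)) : Decidable (Pre_get_prefixs ground module text array) := by unfold Pre_get_prefixs; infer_instance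

def pvWitness_get_prefixs : Int × Int × String × (List (Int × Int)) := (31, 7, "abc", [(1, 2), (0, 3)])

def Spec_get_prefixs (ground : Int) (module : Int) (text : String) (array : List (Int × Int)) (out : String) : Prop := out = get_prefixs_alt ground module text array
instance (ground : Int) (module : Int) (text : String) (array : List (Int × Int)) (out : String) : Decidable (Spec_get_prefixs ground module text array out) := by unfold Spec_get_prefixs; infer_instance

-- ===== CLAIM (what is proved, stated in full; the proofs are below) =====
def Claim_equal_get_prefixs : Prop := ∀ (ground : Int) (module : Int) (text : String) (array : List (Int × Int)), Dom_get_prefixs ground module text array → Pre_get_prefixs ground module text array → Spec_get_prefixs ground module text array (get_prefixs ground module text array)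

-- ===== LEMMAS AND PROOFS =====

-- the per-character hash: ord(c) % module
def pvG (m : Int) (c : Char) : Int := PySem.Int.mod (c.toNat : Int) m

-- the exclusive prefixs sums of g over xs, starting after accumulated value a (B's prefixs list minus its leading 0)
def pvScan (g : Char → Int) : Int → List Char → List Int
  | _, [] => []
  | a, c :: t => (a + g c) :: pvScan g (a + g c) t

lemma pv_hash_single (g m : Int) (c : Char) :
    get_hash g m (String.ofList [c]) = PySem.Int.mod (c.toNat : Int) m := by
  simp [get_hash, pvOrdAt, PySem.Str.len]

lemma pv_scan_build (g : Char → Int) : ∀ (xs : List Char) (ys : List Int) (a : Int),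
    xs.foldl (fun p ch => p ++ [PySem.List.pyGetD p (-1) 0 + g ch]) (ys ++ [a])
      = ys ++ a :: pvScan g a xs := by
  intro xs
  induction xs with
  | nil => intro ys a; simp [pvScan]
  | cons c t ih =>
    intro ys a
    simp only [List.foldl_cons, PySem.List.pyGetD, PySem.List.pyGet?_neg_one_append_singleton,
      Option.getD_some]
    simpa [pvScan] using ih (ys ++ [a]) (a + g c)

lemma pv_scan_getD (g : Char → Int) : ∀ (xs : List Char) (k : Nat) (a : Int), k ≤ xs.length →
    (a :: pvScan g a xs).getD k 0 = a + ((xs.take k).map g).sum := by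
  intro xs
  induction xs with
  | nil => intro k a hk; simp only [Nat.le_zero, List.length_nil] at hk; subst hk; simp
  | cons c t ih =>
    intro k a hk
    cases k with
    | zero => simp
    | succ j =>
      simp only [pvScan, List.getD_cons_succ, List.take_succ_cons, List.map_cons, List.sum_cons]
      rw [ih j (a + g c) (by simpa using hk)]
      ring

lemma pv_sum_drop_take (g : Char → Int) (xs : List Char) (sa sb : Nat) (h : sa <= sb) :
    (((xs.drop sa).take (sb - sa)).map g).sum
      = ((xs.take sb).map g).sum - ((xs.take sa).map g).sum := by
  have hsplit : xs.take sb = xs.take sa ++ (xs.drop sa).take (sb - sa) := by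
    rw [<- List.take_add]; congr 1; omega
  rw [hsplit]; simp

-- the value A computes for one query equals the value B computes for it
lemma pv_query (m : Int) (xs : List Char) (l r : Int) :
    PySem.Int.mod (((PySem.List.slice (xs.map (pvG m)) (some (l - 1)) (some r)).map
        (fun h => PySem.Int.mod h m)).sum) m
    = (if PySem.List.clampIdx xs.length (l - 1) < PySem.List.clampIdx xs.length r
       then PySem.Int.mod ((0 :: pvScan (pvG m) 0 xs).getD (PySem.List.clampIdx xs.length r) 0
            - (0 :: pvScan (pvG m) 0 xs).getD (PySem.List.clampIdx xs.length (l - 1)) 0) m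
       else 0) := by
  have hidem : ∀ c : Char, PySem.Int.mod (pvG m c) m = pvG m c := fun c =>
    Int.fmod_fmod_of_dvd _ dvd_rfl
  set sa := PySem.List.clampIdx xs.length (l - 1) with hsa
  set sb := PySem.List.clampIdx xs.length r with hsb
  have hslice : PySem.List.slice (xs.map (pvG m)) (some (l - 1)) (some r)
      = ((xs.drop sa).take (sb - sa)).map (pvG m) := by
    simp [PySem.List.slice, List.map_take, List.map_drop, hsa, hsb]
  rw [hslice, List.map_map]
  have hmapid : (fun h => PySem.Int.mod h m) ∘ pvG m = pvG m := funext hidem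
  rw [hmapid]
  rw [pv_scan_getD (pvG m) xs sb 0 (PySem.List.clampIdx_le _ _),
      pv_scan_getD (pvG m) xs sa 0 (PySem.List.clampIdx_le _ _)]
  by_cases hlt : sa < sb
  · rw [if_pos hlt]
    rw [pv_sum_drop_take (pvG m) xs sa sb (Nat.le_of_lt hlt)]
    ring_nf
  · rw [if_neg hlt]
    have : sb - sa = 0 := by omega
    rw [this]
    simp [PySem.Int.mod]

-- ===== VERDICT (by name: the statement is the Claim_ definition above) =====
theorem get_prefixs_spec : Claim_equal_get_prefixs := by
  intro ground module text array _ _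
  unfold Spec_get_prefixs get_prefixs get_prefixs_alt
  simp only []
  rw [PySem.List.foldl_append_singleton_eq_map, PySem.List.foldl_append_singleton_eq_map]
  have hhash : text.toList.map (fun char => get_hash ground module (String.ofList [char]))
      = text.toList.map (pvG module) :=
    List.map_congr_left (fun c _ => pv_hash_single ground module c)
  have hpref : text.toList.foldl
      (fun prefixs char => prefixs ++ [PySem.List.pyGetD prefixs (-1) 0 + PySem.Int.mod (char.toNat : Int) module]) [0]
      = 0 :: pvScan (pvG module) 0 text.toList := by
    simpa [pvG] using pv_scan_build (pvG module) text.toList [] 0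
  rw [hhash, hpref]
  simp only [List.nil_append, List.map_map]
  congr 1
  apply List.map_congr_left
  intro lr _
  simp only [Function.comp]
  rw [pv_query module text.toList lr.1 lr.2]
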